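-- pv_equiv track=rewrite | github.com/Kapesiv/nikin-vetoavustin | allsvenskan_app.py | _clean_team_name
-- ===== SOURCE A (Python) =====
-- def _clean_team_name(raw: str) -> str:
--     """Siivoa joukkueen nimi duplikaateista."""
--     for sep in ["Allsvenskan", "Sweden", "FormLast"]:
--         if sep in raw:
--             raw = raw[: raw.index(sep)]
--     n = len(raw)
--     for half in range(n // 2, 3, -1):
--         if raw[:half] == raw[half : half * 2]:
--             return raw[:half].strip()
--     return raw.strip()
-- ===== SOURCE B (Python) =====
-- def _clean_team_name(raw: str) -> str:
--     """Siivoa joukkueen nimi duplikaateista."""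
--     for sep in ("Allsvenskan", "Sweden", "FormLast"):
--         cut = raw.find(sep)
--         if cut != -1:
--             raw = raw[:cut]
--     n = len(raw)
--     # Z-array: z[i] = length of the longest common prefix of raw and raw[i:]
--     z = [0] * n
--     if n:
--         z[0] = n
--     l = r = 0
--     for i in range(1, n):
--         k = min(r - i, z[i - l]) if i < r else 0
--         while i + k < n and raw[k] == raw[i + k]:
--             k += 1
--         z[i] = k
--         if i + k > r:
--             l, r = i, i + k
--     for half in range(n // 2, 3, -1):
--         if z[half] >= half:
--             return raw[:half].strip()
--     return raw.strip()
-- ===== Notes on version B (the rewrite author's own statement) =====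
-- stated objective: alternative
-- what changed: Replaces A's downward scan that re-compares raw[:half] with raw[half:2*half] slice-by-slice (quadratic comparisons in the worst case) by a single linear Z-array pass; the largest valid half is then read off the precomputed table, and the separator cut uses one find() instead of 'in' plus index().
import Mathlib
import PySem

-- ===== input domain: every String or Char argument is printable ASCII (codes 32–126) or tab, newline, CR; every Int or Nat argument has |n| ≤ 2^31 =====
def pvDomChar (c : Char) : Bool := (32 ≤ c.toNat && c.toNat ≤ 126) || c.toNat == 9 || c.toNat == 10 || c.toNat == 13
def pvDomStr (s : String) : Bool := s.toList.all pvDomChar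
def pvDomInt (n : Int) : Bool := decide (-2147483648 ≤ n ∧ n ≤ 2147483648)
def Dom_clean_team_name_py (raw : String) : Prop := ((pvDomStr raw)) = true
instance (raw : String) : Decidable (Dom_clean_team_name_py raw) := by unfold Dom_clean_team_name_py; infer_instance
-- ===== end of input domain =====

-- B replaces A's per-half slice re-comparison scan by a single Z-array pass read off afterwards;
-- same return value on every input (structural alternative, no measured speed claim).

-- ===== PORT A =====
-- one step of A's separator loop: `if sep in raw: raw = raw[: raw.index(sep)]`
-- (str.index = str.find at a position where `sep in raw` guarantees an occurrence)
def pvCutA (r sep : List Char) : List Char :=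
  if PySem.Chars.isIn sep r then PySem.List.slice r none (some (PySem.Chars.find r sep)) else r

-- A's half loop: `for half in range(n // 2, 3, -1): if raw[:half] == raw[half : half*2]: return raw[:half].strip()`
def pvAHalf (s : List Char) (half : Nat) : List Char :=
  if half ≤ 3 then PySem.Chars.strip s          -- loop exhausted: `return raw.strip()`
  else if PySem.List.slice s none (some (half : Int)) =
          PySem.List.slice s (some (half : Int)) (some ((half : Int) * 2)) then
    PySem.Chars.strip (PySem.List.slice s none (some (half : Int)))
  else pvAHalf s (half - 1)
termination_by half
decreasing_by omega

def clean_team_name_py (raw : String) : String :=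
  let s := [("Allsvenskan" : String).toList, ("Sweden" : String).toList,
            ("FormLast" : String).toList].foldl pvCutA raw.toList
  String.ofList (pvAHalf s (s.length / 2))

-- ===== PORT B =====
-- one step of B's separator loop: `cut = raw.find(sep); if cut != -1: raw = raw[:cut]`
def pvCutB (r sep : List Char) : List Char :=
  let cut := PySem.Chars.find r sep
  if cut ≠ -1 then PySem.List.slice r none (some cut) else r

-- B's inner `while i + k < n and raw[k] == raw[i + k]: k += 1`
-- (both indices are in range whenever the bound i + k < n holds, so List.getD is exact)
def pvZWhile (s : List Char) (i k : Nat) : Nat :=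
  if h : i + k < s.length ∧ s.getD k ' ' = s.getD (i + k) ' ' then pvZWhile s i (k + 1)
  else k
termination_by s.length - (i + k)
decreasing_by omega

-- body of B's `for i in range(1, n)` loop; state = (z, l, r); Python's l, r, i are
-- non-negative with l ≤ i, and r - i is only read under `i < r`, so Nat subtraction is exact
def pvZStep (s : List Char) (st : List Nat × Nat × Nat) (i : Nat) : List Nat × Nat × Nat :=
  let z := st.1
  let l := st.2.1
  let r := st.2.2
  let k0 := if i < r then min (r - i) (z.getD (i - l) 0) else 0
  let k := pvZWhile s i k0
  let z' := z.set i k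
  if r < i + k then (z', i, i + k) else (z', l, r)

-- `z = [0] * n; if n: z[0] = n; l = r = 0; for i in range(1, n): …`
def pvZArr (s : List Char) : List Nat :=
  let n := s.length
  let z := if n ≠ 0 then (List.replicate n 0).set 0 n else List.replicate n 0
  ((List.range' 1 (n - 1)).foldl (pvZStep s) (z, 0, 0)).1

-- B's half loop: `for half in range(n // 2, 3, -1): if z[half] >= half: return raw[:half].strip()`
def pvBHalf (s : List Char) (z : List Nat) (half : Nat) : List Char :=
  if half ≤ 3 then PySem.Chars.strip s
  else if half ≤ z.getD half 0 then
    PySem.Chars.strip (PySem.List.slice s none (some (half : Int)))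
  else pvBHalf s z (half - 1)
termination_by half
decreasing_by omega

def clean_team_name_py_alt (raw : String) : String :=
  let s := [("Allsvenskan" : String).toList, ("Sweden" : String).toList,
            ("FormLast" : String).toList].foldl pvCutB raw.toList
  String.ofList (pvBHalf s (pvZArr s) (s.length / 2))

-- ===== PRECONDITION & SPEC =====
def Spec_clean_team_name_py (raw : String) (out : String) : Prop := out = clean_team_name_py_alt raw
instance (raw : String) (out : String) : Decidable (Spec_clean_team_name_py raw out) := by unfold Spec_clean_team_name_py; infer_instance

-- ===== CLAIM (what is proved, stated in full; the proofs are below) =====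
def Claim_equal_clean_team_name_py : Prop := ∀ (raw : String), Dom_clean_team_name_py raw → Spec_clean_team_name_py raw (clean_team_name_py raw)

-- ===== LEMMAS AND PROOFS =====

-- longest common prefix length of two lists
def pvLcp : List Char → List Char → Nat
  | a :: as, b :: bs => if a = b then pvLcp as bs + 1 else 0
  | _, _ => 0
termination_by structural a => a

theorem pvLcp_le_left : ∀ (a b : List Char), pvLcp a b ≤ a.length
  | [], b => by simp [pvLcp]
  | a :: as, [] => by simp [pvLcp]
  | a :: as, b :: bs => by
    simp only [pvLcp, List.length_cons]
    split
    · exact Nat.succ_le_succ (pvLcp_le_left as bs)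
    · omega
termination_by structural a _ => a

theorem pvLcp_le_right : ∀ (a b : List Char), pvLcp a b ≤ b.length
  | [], b => by simp [pvLcp]
  | a :: as, [] => by simp [pvLcp]
  | a :: as, b :: bs => by
    simp only [pvLcp, List.length_cons]
    split
    · exact Nat.succ_le_succ (pvLcp_le_right as bs)
    · omega
termination_by structural a _ => a

theorem pvLcp_self : ∀ (a : List Char), pvLcp a a = a.length
  | [] => rfl
  | a :: as => by simp [pvLcp, pvLcp_self as]
termination_by structural a => a

theorem take_pvLcp : ∀ (a b : List Char) (k : Nat), k ≤ pvLcp a b →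
    a.take k = b.take k
  | _, _, 0, _ => by simp
  | [], b, k + 1, h => by simp [pvLcp] at h
  | a :: as, [], k + 1, h => by simp [pvLcp] at h
  | a :: as, b :: bs, k + 1, h => by
    simp only [pvLcp] at h
    split at h
    · subst ‹a = b›
      simp only [List.take_succ_cons]
      rw [take_pvLcp as bs k (by omega)]
    · omega
termination_by structural a _ _ _ => a

theorem le_pvLcp_of_take : ∀ (a b : List Char) (k : Nat), k ≤ b.length →
    a.take k = b.take k → k ≤ pvLcp a b
  | _, _, 0, _, _ => by omega
  | a, [], k + 1, h, _ => by simp at h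
  | [], b :: bs, k + 1, h, ht => by simp at ht
  | a :: as, b :: bs, k + 1, h, ht => by
    simp only [List.take_succ_cons, List.cons.injEq] at ht
    obtain ⟨rfl, ht⟩ := ht
    have := le_pvLcp_of_take as bs k (by simpa using h) ht
    simp [pvLcp]
    omega
termination_by structural a _ _ _ _ => a

-- the character just past the common prefix differs
theorem pvLcp_getD_ne : ∀ (a b : List Char), pvLcp a b < a.length → pvLcp a b < b.length →
    a.getD (pvLcp a b) ' ' ≠ b.getD (pvLcp a b) ' '
  | [], b, ha, hb => by simp at ha
  | a :: as, [], ha, hb => by simp at hb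
  | a :: as, b :: bs, ha, hb => by
    simp only [pvLcp] at *
    split at ha <;> rename_i hab
    · subst hab
      rw [if_pos rfl] at hb ⊢
      simpa using pvLcp_getD_ne as bs (by simpa using ha) (by simpa using hb)
    · simpa [hab] using hab
termination_by structural a _ _ _ => a

theorem pvGetD_take_lt (a : List Char) (k m : Nat) (h : k < m) :
    (a.take m).getD k ' ' = a.getD k ' ' := by
  simp [List.getD, h]

theorem pvGetD_drop (s : List Char) (i k : Nat) :
    (s.drop i).getD k ' ' = s.getD (i + k) ' ' := by
  simp [List.getD, List.getElem?_drop]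

-- the while loop, started at any k ≤ lcp, finishes exactly at the lcp
theorem pvZWhile_eq (s : List Char) (i : Nat) :
    ∀ k, k ≤ pvLcp s (s.drop i) → pvZWhile s i k = pvLcp s (s.drop i) := by
  intro k hk
  have hL : pvLcp s (s.drop i) ≤ s.length - i := by
    have := pvLcp_le_right s (s.drop i)
    simpa using this
  induction hn : pvLcp s (s.drop i) - k generalizing k with
  | zero =>
    -- k = lcp : the loop condition must fail
    have hkL : k = pvLcp s (s.drop i) := by omega
    subst hkL
    rw [pvZWhile]
    rw [dif_neg]
    rintro ⟨hlt, heq⟩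
    have h1 : pvLcp s (s.drop i) < s.length := by omega
    have h2 : pvLcp s (s.drop i) < (s.drop i).length := by simp; omega
    exact pvLcp_getD_ne s (s.drop i) h1 h2 (by rw [pvGetD_drop]; exact heq)
  | succ m ih =>
    -- k < lcp : the loop condition holds and we recurse
    have hkl : k < pvLcp s (s.drop i) := by omega
    have hdrop : i < s.length := by
      by_contra h
      have : s.drop i = [] := List.drop_eq_nil_of_le (by omega)
      rw [this] at hkl
      simp [pvLcp] at hkl
    have hik : i + k < s.length := by omega
    have htk : s.take (k + 1) = (s.drop i).take (k + 1) := take_pvLcp _ _ _ (by omega)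
    have hch : s.getD k ' ' = s.getD (i + k) ' ' := by
      rw [← pvGetD_drop]
      rw [← pvGetD_take_lt s k (k+1) (by omega), ← pvGetD_take_lt (s.drop i) k (k+1) (by omega), htk]
    rw [pvZWhile, dif_pos ⟨hik, hch⟩]
    exact ih (k + 1) (by omega) (by omega)

-- loop invariant of B's Z loop after the indices 1, …, i-1 have been processed:
-- z holds the true lcp values so far and [l, r) is a matched window
def pvZInv (s : List Char) (i : Nat) (st : List Nat × Nat × Nat) : Prop :=
  st.1.length = s.length ∧
  (∀ j, j < i → st.1.getD j 0 = pvLcp s (s.drop j)) ∧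
  st.2.2 ≤ s.length ∧
  (st.2.2 = 0 ∨ (1 ≤ st.2.1 ∧ st.2.1 < i ∧ st.2.2 - st.2.1 ≤ pvLcp s (s.drop st.2.1)))

theorem pvZStep_inv (s : List Char) (i : Nat) (st : List Nat × Nat × Nat)
    (hi : 1 ≤ i) (hin : i < s.length) (h : pvZInv s i st) :
    pvZInv s (i + 1) (pvZStep s st i) := by
  obtain ⟨z, l, r⟩ := st
  obtain ⟨hsize, hz, hrlen, hw⟩ := h
  simp only at hsize hz hrlen hw
  -- the starting value of the inner while loop never exceeds the true lcp
  have hk0 : (if i < r then min (r - i) (z.getD (i - l) 0) else 0) ≤ pvLcp s (s.drop i) := by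
    split
    · rename_i hir
      obtain ⟨hl1, hli, hwin⟩ := hw.resolve_left (by omega)
      rw [hz (i - l) (by omega)]
      set k0 := min (r - i) (pvLcp s (s.drop (i - l))) with hk0def
      apply le_pvLcp_of_take s (s.drop i) k0 (by simp; omega)
      -- s.take k0 = (s.drop (i-l)).take k0 = (s.drop i).take k0
      have h1 : s.take k0 = (s.drop (i - l)).take k0 :=
        take_pvLcp _ _ _ (by omega)
      have hwt : s.take (r - l) = (s.drop l).take (r - l) := take_pvLcp _ _ _ hwin
      -- drop (i-l) of the matched window, then take (r-i)
      have h2 : (s.drop (i - l)).take (r - i) = (s.drop i).take (r - i) := by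
        have e1 : (s.take (r - l)).drop (i - l) = (s.drop (i - l)).take (r - l - (i - l)) :=
          List.drop_take ..
        have e2 : ((s.drop l).take (r - l)).drop (i - l) = ((s.drop l).drop (i - l)).take (r - l - (i - l)) :=
          List.drop_take ..
        have e3 : (s.drop l).drop (i - l) = s.drop i := by
          rw [List.drop_drop]
          congr 1
          omega
        have e4 : r - l - (i - l) = r - i := by omega
        rw [e3, e4] at e2
        rw [e4] at e1
        rw [← e1, ← e2, hwt]
      have h3 : (s.drop (i - l)).take k0 = (s.drop i).take k0 := by
        have := congrArg (List.take k0) h2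
        simpa [List.take_take, Nat.min_eq_left (show k0 ≤ r - i by omega)] using this
      rw [h1, h3]
    · omega
  have hk : pvZWhile s i (if i < r then min (r - i) (z.getD (i - l) 0) else 0) = pvLcp s (s.drop i) :=
    pvZWhile_eq s i _ hk0
  have hLle : pvLcp s (s.drop i) ≤ s.length - i := by
    have := pvLcp_le_right s (s.drop i)
    simpa using this
  unfold pvZStep
  simp only [hk]
  have hzset : ∀ j, j < i + 1 → (z.set i (pvLcp s (s.drop i))).getD j 0 = pvLcp s (s.drop j) := by
    intro j hj
    rcases Nat.lt_or_ge j i with hji | hji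
    · rw [List.getD, List.getElem?_set_ne (by omega), ← List.getD]
      exact hz j hji
    · have : j = i := by omega
      subst this
      rw [List.getD, List.getElem?_set_self (by omega), Option.getD_some]
  split
  · rename_i hlt
    simp only [pvZInv, List.length_set]
    exact ⟨hsize, hzset, by omega, Or.inr ⟨hi, by omega, by omega⟩⟩
  · rename_i hge
    simp only [pvZInv, List.length_set]
    refine ⟨hsize, hzset, by omega, ?_⟩
    rcases hw with h0 | ⟨hl1, hli, hwin⟩
    · exact Or.inl h0
    · exact Or.inr ⟨hl1, by omega, hwin⟩

theorem pvZInit (s : List Char) :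
    pvZInv s 1 ((if s.length ≠ 0 then (List.replicate s.length 0).set 0 s.length
                 else List.replicate s.length 0), 0, 0) := by
  refine ⟨?_, ?_, Nat.zero_le _, Or.inl rfl⟩
  · split <;> simp
  · intro j hj
    have : j = 0 := by omega
    subst this
    simp only [List.drop_zero, pvLcp_self]
    split
    · rename_i hne
      rw [List.getD, List.getElem?_set_self (by simpa using Nat.pos_of_ne_zero hne), Option.getD_some]
    · rename_i hn
      simp only [ne_eq, Decidable.not_not] at hn
      simp [hn]

theorem pvZFold_inv (s : List Char) : ∀ m, m ≤ s.length - 1 →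
    pvZInv s (m + 1) ((List.range' 1 m).foldl (pvZStep s)
      ((if s.length ≠ 0 then (List.replicate s.length 0).set 0 s.length
        else List.replicate s.length 0), 0, 0)) := by
  intro m
  induction m with
  | zero => intro _; simpa using pvZInit s
  | succ m ih =>
    intro hm
    rw [List.range'_concat, List.foldl_append, List.foldl_cons, List.foldl_nil]
    have h1 : (1 : Nat) + 1 * m = m + 1 := by omega
    rw [h1]
    exact pvZStep_inv s (m + 1) _ (by omega) (by omega) (ih (by omega))

theorem pvZArr_getD (s : List Char) (j : Nat) (hj : j < s.length) :
    (pvZArr s).getD j 0 = pvLcp s (s.drop j) := by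
  have h := pvZFold_inv s (s.length - 1) (Nat.le_refl _)
  simp only [pvZArr]
  exact h.2.1 j (by omega)

theorem pvCut_eq (r sep : List Char) : pvCutA r sep = pvCutB r sep := by
  simp only [pvCutA, pvCutB]
  by_cases h : sep <:+: r
  · rw [if_pos ((PySem.Chars.isIn_iff_infix _ _).mpr h), if_pos ((PySem.Chars.find_ne_neg_one_iff _ _).mpr h)]
  · rw [if_neg (fun hc => h ((PySem.Chars.isIn_iff_infix _ _).mp hc)),
        if_neg (fun hc => h ((PySem.Chars.find_ne_neg_one_iff _ _).mp hc))]

theorem pvHalf_eq (s : List Char) : ∀ half, half ≤ s.length / 2 →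
    pvAHalf s half = pvBHalf s (pvZArr s) half := by
  intro half
  induction half with
  | zero => intro _; rw [pvAHalf, pvBHalf]; simp
  | succ h ih =>
    intro hle
    by_cases h3 : h + 1 ≤ 3
    · rw [pvAHalf, pvBHalf, if_pos h3, if_pos h3]
    · have hz : (pvZArr s).getD (h + 1) 0 = pvLcp s (s.drop (h + 1)) :=
        pvZArr_getD s (h + 1) (by omega)
      have hsl1 : PySem.List.slice s none (some ((h + 1 : Nat) : Int)) = s.take (h + 1) :=
        PySem.List.slice_to_natCast ..
      have hsl2 : PySem.List.slice s (some ((h + 1 : Nat) : Int)) (some (((h + 1 : Nat) : Int) * 2)) =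
          (s.drop (h + 1)).take (h + 1) := by
        rw [mul_two]
        exact PySem.List.slice_natCast_add ..
      have hiff : (s.take (h + 1) = (s.drop (h + 1)).take (h + 1)) ↔
          (h + 1 ≤ (pvZArr s).getD (h + 1) 0) := by
        rw [hz]
        constructor
        · exact fun ht => le_pvLcp_of_take s (s.drop (h + 1)) (h + 1) (by simp; omega) ht
        · exact fun hm => take_pvLcp s (s.drop (h + 1)) (h + 1) hm
      rw [pvAHalf, pvBHalf, if_neg h3, if_neg h3, hsl1, hsl2]
      by_cases hc : s.take (h + 1) = (s.drop (h + 1)).take (h + 1)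
      · rw [if_pos hc, if_pos (hiff.mp hc)]
      · rw [if_neg hc, if_neg (fun hm => hc (hiff.mpr hm))]
        exact ih (by omega)

-- ===== VERDICT (by name: the statement is the Claim_ definition above) =====
theorem clean_team_name_py_spec : Claim_equal_clean_team_name_py := by
  intro raw _
  unfold Spec_clean_team_name_py
  simp only [clean_team_name_py, clean_team_name_py_alt]
  have hc : pvCutA = pvCutB := funext fun r => funext fun sep => pvCut_eq r sep
  rw [hc, pvHalf_eq _ _ (Nat.le_refl _)]
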